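-- pv_equiv track=rewrite | github.com/fishpidev/AdventOfCode-2019 | aoc-2019-01.py | calculate_fuel_complex
-- ===== SOURCE A (Python) =====
-- import math
--
-- def calculate_fuel_complex(mass):
--     fuelFuel = []
--     while mass > 0:
--         inter_fuel = math.floor(mass / 3)-2
--         if inter_fuel > 0:
--             fuelFuel.append(inter_fuel)
--         mass = inter_fuel
--     return fuelFuel
-- ===== SOURCE B (Python) =====
-- import math
--
-- def calculate_fuel_complex(mass):
--     def go(m, acc):
--         nxt = m // 3 - 2
--         if nxt <= 0:
--             return acc
--         return go(nxt, [nxt] + acc)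
--     if mass <= 0:
--         return []
--     return list(reversed(go(mass, [])))
-- ===== Notes on version B (the rewrite author's own statement) =====
-- stated objective: alternative
-- what changed: Replaces the while-loop appending to a mutable list by a tail-recursive helper that prepends each stage's fuel onto an accumulator and reverses the accumulator once at the end.
import Mathlib
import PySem

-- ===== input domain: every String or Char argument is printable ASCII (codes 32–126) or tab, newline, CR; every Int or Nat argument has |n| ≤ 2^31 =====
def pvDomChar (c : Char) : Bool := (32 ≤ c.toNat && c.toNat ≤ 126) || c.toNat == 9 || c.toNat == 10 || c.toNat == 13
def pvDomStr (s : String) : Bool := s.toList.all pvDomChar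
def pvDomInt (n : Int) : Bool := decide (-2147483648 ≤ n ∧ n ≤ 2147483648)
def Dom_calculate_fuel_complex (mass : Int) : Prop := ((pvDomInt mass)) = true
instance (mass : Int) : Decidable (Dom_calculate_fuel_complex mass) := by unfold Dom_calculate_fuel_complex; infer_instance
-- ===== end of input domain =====

-- B replaces A's while-loop with a mutable append-accumulator by a tail-recursive
-- helper prepending onto an accumulator, reversed once at the end (objective: alternative).

-- ===== PORT A =====
-- A's while loop, one recursive step per iteration over the same state (mass, fuelFuel).
-- The Nat argument is only a totality guard: mass strictly decreases each iteration, so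
-- mass.toNat iterations always suffice and the 0 case is never the one that stops the loop.
def calculate_fuel_complex_loop : Nat → Int → List Int → List Int
  | 0, _, fuelFuel => fuelFuel
  | n + 1, mass, fuelFuel =>
    if mass > 0 then
      let inter_fuel := PySem.Int.floordiv mass 3 - 2
      calculate_fuel_complex_loop n inter_fuel
        (if inter_fuel > 0 then fuelFuel ++ [inter_fuel] else fuelFuel)
    else fuelFuel

def calculate_fuel_complex (mass : Int) : List Int :=
  calculate_fuel_complex_loop mass.toNat mass []

-- ===== PORT B =====
-- B's inner tail recursion 'go'; terminates because each stage's fuel is strictly smaller.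
def calculate_fuel_complex_alt_go (m : Int) (acc : List Int) : List Int :=
  let nxt := PySem.Int.floordiv m 3 - 2
  if nxt ≤ 0 then acc
  else calculate_fuel_complex_alt_go nxt (nxt :: acc)
termination_by m.toNat
decreasing_by
  rename_i h
  have h3 : PySem.Int.floordiv m 3 = m / 3 := PySem.Int.floordiv_eq_ediv_of_pos (by omega)
  omega

def calculate_fuel_complex_alt (mass : Int) : List Int :=
  if mass ≤ 0 then [] else (calculate_fuel_complex_alt_go mass []).reverse

-- ===== PRECONDITION & SPEC =====
def Spec_calculate_fuel_complex (mass : Int) (out : List Int) : Prop := out = calculate_fuel_complex_alt mass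
instance (mass : Int) (out : List Int) : Decidable (Spec_calculate_fuel_complex mass out) := by unfold Spec_calculate_fuel_complex; infer_instance

-- ===== CLAIM (what is proved, stated in full; the proofs are below) =====
def Claim_equal_calculate_fuel_complex : Prop := ∀ (mass : Int), Dom_calculate_fuel_complex mass → Spec_calculate_fuel_complex mass (calculate_fuel_complex mass)

-- ===== LEMMAS AND PROOFS =====

-- proof-only reference cascade: the list of successive fuel values, fueled by n
def pvChain : Nat → Int → List Int
  | 0, _ => []
  | n + 1, mass =>
    if mass ≤ 0 then []
    else
      let inter := PySem.Int.floordiv mass 3 - 2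
      if inter ≤ 0 then [] else inter :: pvChain n inter

-- A's loop extends its accumulator by exactly the cascade
theorem pv_loop_eq_chain (n : Nat) :
    ∀ (mass : Int) (acc : List Int), mass.toNat ≤ n →
      calculate_fuel_complex_loop n mass acc = acc ++ pvChain n mass := by
  induction n with
  | zero =>
    intro mass acc _
    simp [calculate_fuel_complex_loop, pvChain]
  | succ n ih =>
    intro mass acc hle
    by_cases hm : mass > 0
    · have h3 : PySem.Int.floordiv mass 3 = mass / 3 :=
        PySem.Int.floordiv_eq_ediv_of_pos (by omega)
      have hlt : (PySem.Int.floordiv mass 3 - 2).toNat ≤ n := by rw [h3]; omega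
      simp only [calculate_fuel_complex_loop, pvChain]
      rw [if_pos hm, if_neg (by omega : ¬ mass ≤ 0), ih _ _ hlt]
      by_cases hpos : PySem.Int.floordiv mass 3 - 2 > 0
      · rw [if_pos hpos, if_neg (by omega : ¬ PySem.Int.floordiv mass 3 - 2 ≤ 0)]
        simp
      · rw [if_neg hpos, if_pos (by omega : PySem.Int.floordiv mass 3 - 2 ≤ 0)]
        cases n with
        | zero => simp [pvChain]
        | succ k =>
          simp only [pvChain]
          rw [if_pos (by omega : PySem.Int.floordiv mass 3 - 2 ≤ 0)]
    · cases hn : n with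
      | zero =>
        simp only [calculate_fuel_complex_loop, pvChain]
        rw [if_neg hm, if_pos (by omega : mass ≤ 0)]
        simp
      | succ k =>
        simp only [calculate_fuel_complex_loop, pvChain]
        rw [if_neg hm, if_pos (by omega : mass ≤ 0)]
        simp

-- B's tail recursion prepends exactly the reversed cascade
theorem pv_go_eq_chain (n : Nat) :
    ∀ (mass : Int) (acc : List Int), mass.toNat ≤ n →
      calculate_fuel_complex_alt_go mass acc = (pvChain n mass).reverse ++ acc := by
  induction n with
  | zero =>
    intro mass acc hle
    have hm : mass ≤ 0 := by omega
    rw [calculate_fuel_complex_alt_go.eq_def]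
    have h3 : PySem.Int.floordiv mass 3 = mass / 3 :=
      PySem.Int.floordiv_eq_ediv_of_pos (by omega)
    rw [if_pos (by rw [h3]; omega : PySem.Int.floordiv mass 3 - 2 ≤ 0)]
    simp [pvChain]
  | succ n ih =>
    intro mass acc hle
    have h3 : PySem.Int.floordiv mass 3 = mass / 3 :=
      PySem.Int.floordiv_eq_ediv_of_pos (by omega)
    rw [calculate_fuel_complex_alt_go]
    by_cases hpos : PySem.Int.floordiv mass 3 - 2 ≤ 0
    · rw [if_pos hpos]
      simp only [pvChain]
      by_cases hm : mass ≤ 0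
      · rw [if_pos hm]; simp
      · rw [if_neg hm, if_pos hpos]; simp
    · rw [if_neg hpos]
      have hm : ¬ mass ≤ 0 := by rw [h3] at hpos; omega
      have hlt : (PySem.Int.floordiv mass 3 - 2).toNat ≤ n := by rw [h3]; omega
      rw [ih _ _ hlt]
      simp only [pvChain]
      rw [if_neg hm, if_neg hpos]
      simp

-- ===== VERDICT (by name: the statement is the Claim_ definition above) =====
theorem calculate_fuel_complex_spec : Claim_equal_calculate_fuel_complex := by
  intro mass _
  unfold Spec_calculate_fuel_complex calculate_fuel_complex calculate_fuel_complex_alt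
  by_cases hm : mass ≤ 0
  · have h0 : mass.toNat = 0 := by omega
    rw [if_pos hm, h0]
    simp [calculate_fuel_complex_loop]
  · rw [if_neg hm,
      pv_loop_eq_chain mass.toNat mass [] (le_refl _),
      pv_go_eq_chain mass.toNat mass [] (le_refl _)]
    simp
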